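-- pv_equiv track=rewrite | github.com/cocoheart0128/CodingTest | 프로그래머스/0/181893. 배열 조각하기/배열 조각하기.py | solution
-- ===== SOURCE A (Python) =====
-- def solution(arr, query):
--     for i in range(len(query)):
--         if i%2==0:
--             n = query[i]
--             arr=arr[:n+1]
--         else:
--             n = query[i]
--             arr = arr[n:]
--     answer = arr
--     return answer
-- ===== SOURCE B (Python) =====
-- def solution(arr, query):
--     # Track the current window [start, end) into the original arr; slice once at the end.
--     start, end = 0, len(arr)
--     for i, n in enumerate(query):
--         length = end - start
--         if i % 2 == 0:
--             b = n + 1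
--             if b < 0:
--                 b += length
--             b = min(max(b, 0), length)
--             end = start + b
--         else:
--             a = n
--             if a < 0:
--                 a += length
--             a = min(max(a, 0), length)
--             start = start + a
--     return arr[start:end]
-- ===== Notes on version B (the rewrite author's own statement) =====
-- stated objective: alternative
-- what changed: Instead of materialising a new list slice for every query, B only tracks the window offsets [start, end) across all queries (pure integer arithmetic mirroring Python slice-bound resolution) and slices the original array exactly once at the end.
import Mathlib
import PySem

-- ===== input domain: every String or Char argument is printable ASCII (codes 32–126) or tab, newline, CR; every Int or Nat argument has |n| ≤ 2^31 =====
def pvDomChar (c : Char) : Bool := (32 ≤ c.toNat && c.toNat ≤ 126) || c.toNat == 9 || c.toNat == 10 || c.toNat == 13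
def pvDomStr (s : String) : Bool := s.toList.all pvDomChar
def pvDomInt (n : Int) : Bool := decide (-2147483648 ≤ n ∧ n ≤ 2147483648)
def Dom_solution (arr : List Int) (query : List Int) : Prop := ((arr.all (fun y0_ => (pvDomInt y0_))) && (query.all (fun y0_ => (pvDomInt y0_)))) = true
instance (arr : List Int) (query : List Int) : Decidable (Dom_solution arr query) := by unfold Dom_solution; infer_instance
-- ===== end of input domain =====

-- B replaces A's per-query list slicing by integer window-offset tracking with a single final slice of the original array.

-- ===== PORT A =====
-- one loop iteration of A: slice the current list by query[i]
def stepA (a : List Int) (p : Int × Int) : List Int :=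
  if p.1 % 2 == 0 then PySem.List.slice a none (some (p.2 + 1))
  else PySem.List.slice a (some p.2) none

def solution (arr : List Int) (query : List Int) : List Int :=
  (PySem.List.enumerate query).foldl stepA arr

-- ===== PORT B =====
-- one loop iteration of B: update the (start, end) window offsets by query[i]
def stepB (se : Int × Int) (p : Int × Int) : Int × Int :=
  let len := se.2 - se.1
  if p.1 % 2 == 0 then
    let b := p.2 + 1
    let b := if b < 0 then b + len else b
    let b := min (max b 0) len
    (se.1, se.1 + b)
  else
    let a := p.2
    let a := if a < 0 then a + len else a
    let a := min (max a 0) len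
    (se.1 + a, se.2)

def solution_alt (arr : List Int) (query : List Int) : List Int :=
  let st := (PySem.List.enumerate query).foldl stepB (0, (arr.length : Int))
  PySem.List.slice arr (some st.1) (some st.2)

-- ===== PRECONDITION & SPEC =====
def Spec_solution (arr : List Int) (query : List Int) (out : List Int) : Prop := out = solution_alt arr query
instance (arr : List Int) (query : List Int) (out : List Int) : Decidable (Spec_solution arr query out) := by unfold Spec_solution; infer_instance

-- ===== CLAIM (what is proved, stated in full; the proofs are below) =====
def Claim_equal_solution : Prop := ∀ (arr : List Int) (query : List Int), Dom_solution arr query → Spec_solution arr query (solution arr query)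

-- ===== LEMMAS AND PROOFS =====

lemma window_length (arr : List Int) (s e : Nat) (_hse : s ≤ e) (he : e ≤ arr.length) :
    ((arr.drop s).take (e - s)).length = e - s := by
  simp [List.length_take, List.length_drop]; omega

-- one step preserves the window invariant
lemma step_inv (arr : List Int) (p : Int × Int) (s e : Nat) (hse : s ≤ e) (he : e ≤ arr.length) :
    ∃ s' e' : Nat, s' ≤ e' ∧ e' ≤ arr.length ∧
      stepB ((s : Int), (e : Int)) p = ((s' : Int), (e' : Int)) ∧
      stepA ((arr.drop s).take (e - s)) p = (arr.drop s').take (e' - s') := by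
  by_cases hpar : p.1 % 2 == 0
  · -- even index: arr = arr[:n+1]
    have hb : PySem.List.clampIdx (e - s) (p.2 + 1) ≤ e - s := PySem.List.clampIdx_le _ _
    refine ⟨s, s + PySem.List.clampIdx (e - s) (p.2 + 1), by omega, by omega, ?_, ?_⟩
    · simp only [stepB, hpar, Prod.mk.injEq, true_and, if_true]
      simp only [PySem.List.clampIdx]
      split_ifs <;> omega
    · simp only [stepA, hpar, if_true, PySem.List.slice,
        window_length arr s e hse he, List.drop_zero, List.take_take, Nat.sub_zero]
      congr 1
      omega
  · -- odd index: arr = arr[n:]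
    have hb : PySem.List.clampIdx (e - s) p.2 ≤ e - s := PySem.List.clampIdx_le _ _
    refine ⟨s + PySem.List.clampIdx (e - s) p.2, e, by omega, he, ?_, ?_⟩
    · simp only [stepB]
      rw [if_neg hpar]
      simp only [Prod.mk.injEq, and_true]
      simp only [PySem.List.clampIdx]
      split_ifs <;> omega
    · simp only [stepA]
      rw [if_neg hpar]
      rw [PySem.List.slice_some_none, window_length arr s e hse he, List.drop_take,
        List.drop_drop]
      congr 1
      omega

-- the whole loop preserves the window invariant
lemma loop_inv (arr : List Int) (l : List (Int × Int)) :
    ∀ (s e : Nat), s ≤ e → e ≤ arr.length →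
      ∃ s' e' : Nat, s' ≤ e' ∧ e' ≤ arr.length ∧
        l.foldl stepB ((s : Int), (e : Int)) = ((s' : Int), (e' : Int)) ∧
        l.foldl stepA ((arr.drop s).take (e - s)) = (arr.drop s').take (e' - s') := by
  induction l with
  | nil => exact fun s e hse he => ⟨s, e, hse, he, rfl, rfl⟩
  | cons p l ih =>
    intro s e hse he
    obtain ⟨s₁, e₁, h₁, h₂, hB, hA⟩ := step_inv arr p s e hse he
    obtain ⟨s', e', h₁', h₂', hB', hA'⟩ := ih s₁ e₁ h₁ h₂
    exact ⟨s', e', h₁', h₂', by simpa [List.foldl_cons, hB] using hB',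
      by simpa [List.foldl_cons, hA] using hA'⟩

-- ===== VERDICT (by name: the statement is the Claim_ definition above) =====
theorem solution_spec : Claim_equal_solution := by
  intro arr query _
  obtain ⟨s', e', h₁, h₂, hB, hA⟩ :=
    loop_inv arr (PySem.List.enumerate query) 0 arr.length (Nat.zero_le _) le_rfl
  show solution arr query = solution_alt arr query
  unfold solution solution_alt
  rw [show ((0 : Int), (arr.length : Int)) = (((0 : Nat) : Int), ((arr.length : Nat) : Int))
    by norm_num, hB]
  conv_lhs => rw [show arr = (arr.drop 0).take (arr.length - 0) by simp]
  rw [hA]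
  simp only [PySem.List.slice, PySem.List.clampIdx_natCast, Nat.min_eq_left h₂,
    Nat.min_eq_left (h₁.trans h₂)]
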